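-- pv_equiv track=rewrite | github.com/ChaosAIs/dots-ocr-app | backend/analytics_service/prompt_builder.py | _format_flat_schema
-- ===== SOURCE A (Python) =====
-- from typing import Dict, List, Any, Optional
--
-- def _format_flat_schema(field_mappings: Dict[str, Dict[str, Any]]) -> str:
--     """Format flat field mappings (legacy format)."""
--     # Group by source
--     header_fields = []
--     summary_fields = []
--     line_item_fields = []
--
--     for field_name, mapping in field_mappings.items():
--         if field_name in ['header_mappings', 'line_item_mappings', 'summary_mappings']:
--             continue
--
--         source = mapping.get('source', 'line_item')
--         data_type = mapping.get('data_type', 'string')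
--         db_field = mapping.get('db_field', field_name)
--
--         if source == 'header':
--             header_fields.append(f"- `{db_field}` ({data_type}) → `header_data->>'{db_field}'`")
--         elif source == 'summary':
--             summary_fields.append(f"- `{db_field}` ({data_type}) → `summary_data->>'{db_field}'`")
--         else:
--             line_item_fields.append(f"- `{db_field}` ({data_type}) → `item->>'{db_field}'`")
--
--     lines = []
--     if header_fields:
--         lines.append("### Header Fields")
--         lines.extend(header_fields)
--     if summary_fields:
--         lines.append("\n### Summary Fields")
--         lines.extend(summary_fields)
--     if line_item_fields:
--         lines.append("\n### Line Item Fields")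
--         lines.extend(line_item_fields)
--
--     return "\n".join(lines) if lines else "No fields available."
-- ===== SOURCE B (Python) =====
-- _RESERVED = ('header_mappings', 'line_item_mappings', 'summary_mappings')
--
--
-- def _source(mapping):
--     return mapping.get('source', 'line_item')
--
--
-- def _format_flat_schema(field_mappings):
--     """Format flat field mappings (legacy format)."""
--     items = [(k, v) for k, v in field_mappings.items() if k not in _RESERVED]
--     header = [f"- `{v.get('db_field', k)}` ({v.get('data_type', 'string')}) \u2192 `header_data->>'{v.get('db_field', k)}'`"
--               for k, v in items if _source(v) == 'header']
--     summary = [f"- `{v.get('db_field', k)}` ({v.get('data_type', 'string')}) \u2192 `summary_data->>'{v.get('db_field', k)}'`"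
--                for k, v in items if _source(v) == 'summary']
--     line_item = [f"- `{v.get('db_field', k)}` ({v.get('data_type', 'string')}) \u2192 `item->>'{v.get('db_field', k)}'`"
--                  for k, v in items if _source(v) != 'header' and _source(v) != 'summary']
--     lines = (([] if not header else ["### Header Fields"] + header)
--              + ([] if not summary else ["\n### Summary Fields"] + summary)
--              + ([] if not line_item else ["\n### Line Item Fields"] + line_item))
--     return "\n".join(lines) if lines else "No fields available."
-- ===== Notes on version B (the rewrite author's own statement) =====
-- stated objective: alternative
-- what changed: The single classifying loop with three growing accumulator lists is replaced by three independent filter-and-format passes over the items (header, summary, line-item), assembled by concatenating the three optional sections.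
import Mathlib
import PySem

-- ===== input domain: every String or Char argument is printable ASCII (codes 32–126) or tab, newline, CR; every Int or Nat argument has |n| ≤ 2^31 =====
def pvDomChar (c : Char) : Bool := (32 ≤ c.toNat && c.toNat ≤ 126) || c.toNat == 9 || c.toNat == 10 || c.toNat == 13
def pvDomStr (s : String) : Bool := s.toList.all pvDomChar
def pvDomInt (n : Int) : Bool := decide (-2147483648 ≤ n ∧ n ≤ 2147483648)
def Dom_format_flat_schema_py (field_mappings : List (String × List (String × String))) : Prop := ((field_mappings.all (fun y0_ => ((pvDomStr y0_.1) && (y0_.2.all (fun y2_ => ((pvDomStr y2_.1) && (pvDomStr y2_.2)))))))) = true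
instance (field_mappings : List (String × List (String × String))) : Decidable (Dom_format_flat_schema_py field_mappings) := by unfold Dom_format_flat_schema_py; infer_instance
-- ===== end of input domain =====

-- B replaces A's single classifying loop (three growing accumulators) by three independent filter passes, one per section; same cost, different decomposition.

-- shared formatting primitives (both Pythons build the identical f-strings / dict lookups)
def pvMapGet (m : List (String × String)) (k dflt : String) : String :=
  PySem.Dict.getD (PySem.Dict.mk m) k dflt

def pvHeaderRow (name : String) (m : List (String × String)) : String :=
  "- `" ++ pvMapGet m "db_field" name ++ "` (" ++ pvMapGet m "data_type" "string" ++ ") → `header_data->>'" ++ pvMapGet m "db_field" name ++ "'`"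

def pvSummaryRow (name : String) (m : List (String × String)) : String :=
  "- `" ++ pvMapGet m "db_field" name ++ "` (" ++ pvMapGet m "data_type" "string" ++ ") → `summary_data->>'" ++ pvMapGet m "db_field" name ++ "'`"

def pvItemRow (name : String) (m : List (String × String)) : String :=
  "- `" ++ pvMapGet m "db_field" name ++ "` (" ++ pvMapGet m "data_type" "string" ++ ") → `item->>'" ++ pvMapGet m "db_field" name ++ "'`"

-- ===== PORT A =====
-- the body of A's single for-loop: classify one (field_name, mapping) into one of the three accumulators
def pvStepA (st : List String × List String × List String)
    (p : String × List (String × String)) : List String × List String × List String :=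
  if p.1 = "header_mappings" ∨ p.1 = "line_item_mappings" ∨ p.1 = "summary_mappings" then st
  else if pvMapGet p.2 "source" "line_item" = "header" then
    (st.1 ++ [pvHeaderRow p.1 p.2], st.2.1, st.2.2)
  else if pvMapGet p.2 "source" "line_item" = "summary" then
    (st.1, st.2.1 ++ [pvSummaryRow p.1 p.2], st.2.2)
  else
    (st.1, st.2.1, st.2.2 ++ [pvItemRow p.1 p.2])

def format_flat_schema_py (field_mappings : List (String × List (String × String))) : String :=
  let st := field_mappings.foldl pvStepA ([], [], [])
  let lines : List String := []
  let lines := if st.1.isEmpty then lines else lines ++ ("### Header Fields" :: st.1)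
  let lines := if st.2.1.isEmpty then lines else lines ++ ("\n### Summary Fields" :: st.2.1)
  let lines := if st.2.2.isEmpty then lines else lines ++ ("\n### Line Item Fields" :: st.2.2)
  if lines.isEmpty then "No fields available." else PySem.Str.join "\n" lines

-- ===== PORT B =====
def pvReserved (k : String) : Bool :=
  k == "header_mappings" || k == "line_item_mappings" || k == "summary_mappings"

def pvSource (m : List (String × String)) : String :=
  pvMapGet m "source" "line_item"

def format_flat_schema_py_alt (field_mappings : List (String × List (String × String))) : String :=
  let items := field_mappings.filter (fun p => !pvReserved p.1)
  let header := (items.filter (fun p => pvSource p.2 == "header")).map (fun p => pvHeaderRow p.1 p.2)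
  let summary := (items.filter (fun p => pvSource p.2 == "summary")).map (fun p => pvSummaryRow p.1 p.2)
  let line_item := (items.filter (fun p => pvSource p.2 != "header" && pvSource p.2 != "summary")).map
    (fun p => pvItemRow p.1 p.2)
  let lines := (if header.isEmpty then [] else "### Header Fields" :: header)
            ++ (if summary.isEmpty then [] else "\n### Summary Fields" :: summary)
            ++ (if line_item.isEmpty then [] else "\n### Line Item Fields" :: line_item)
  if lines.isEmpty then "No fields available." else PySem.Str.join "\n" lines

-- ===== PRECONDITION & SPEC =====
def Spec_format_flat_schema_py (field_mappings : List (String × List (String × String))) (out : String) : Prop := out = format_flat_schema_py_alt field_mappings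
instance (field_mappings : List (String × List (String × String))) (out : String) : Decidable (Spec_format_flat_schema_py field_mappings out) := by unfold Spec_format_flat_schema_py; infer_instance

-- ===== CLAIM (what is proved, stated in full; the proofs are below) =====
def Claim_equal_format_flat_schema_py : Prop := ∀ (field_mappings : List (String × List (String × String))), Dom_format_flat_schema_py field_mappings → Spec_format_flat_schema_py field_mappings (format_flat_schema_py field_mappings)

-- ===== LEMMAS AND PROOFS =====

-- A's loop state after the fold equals B's three filtered sections, prefixed by the accumulators.
theorem pv_fold_eq (l : List (String × List (String × String))) (hs ss ls : List String) :
    l.foldl pvStepA (hs, ss, ls)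
    = (hs ++ (((l.filter (fun p => !pvReserved p.1)).filter (fun p => pvSource p.2 == "header")).map (fun p => pvHeaderRow p.1 p.2)),
       ss ++ (((l.filter (fun p => !pvReserved p.1)).filter (fun p => pvSource p.2 == "summary")).map (fun p => pvSummaryRow p.1 p.2)),
       ls ++ (((l.filter (fun p => !pvReserved p.1)).filter (fun p => pvSource p.2 != "header" && pvSource p.2 != "summary")).map (fun p => pvItemRow p.1 p.2))) := by
  induction l generalizing hs ss ls with
  | nil => simp
  | cons p t ih =>
    simp only [List.foldl_cons, pvStepA]
    by_cases hres : p.1 = "header_mappings" ∨ p.1 = "line_item_mappings" ∨ p.1 = "summary_mappings"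
    · have hres' : pvReserved p.1 = true := by
        unfold pvReserved; rcases hres with h | h | h <;> simp [h]
      rw [if_pos hres, ih]
      simp [hres']
    · have hres' : pvReserved p.1 = false := by
        unfold pvReserved; push Not at hres
        simp [hres.1, hres.2.1, hres.2.2]
      rw [if_neg hres]
      by_cases hh : pvMapGet p.2 "source" "line_item" = "header"
      · rw [if_pos hh, ih]
        simp [hres', pvSource, hh, List.append_assoc]
      · rw [if_neg hh]
        by_cases hsm : pvMapGet p.2 "source" "line_item" = "summary"
        · rw [if_pos hsm, ih]
          simp [hres', pvSource, hsm, List.append_assoc]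
        · rw [if_neg hsm, ih]
          simp [hres', pvSource, hsm, hh, List.append_assoc]

-- ===== VERDICT (by name: the statement is the Claim_ definition above) =====
theorem format_flat_schema_py_spec : Claim_equal_format_flat_schema_py := by
  intro fm _
  unfold Spec_format_flat_schema_py format_flat_schema_py format_flat_schema_py_alt
  rw [pv_fold_eq fm [] [] []]
  simp only [List.nil_append]
  split_ifs <;> simp_all [List.append_assoc]
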